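-- pv_equiv track=rewrite | github.com/thecodercody/dsa | problems/p33_two_heap_prune/solution.py | solution
-- ===== SOURCE A (Python) =====
-- import heapq
-- from typing import List, Optional
--
-- class _TwoHeap:
--     def __init__(self):
--         self.minHeap, self.maxHeap = [], []
--         self.minSize, self.maxSize = 0, 0
--         self.delayed = {}
--
--     def prune(self, heap) -> None:
--         # TODO: while heap is non-empty, peek at the top element.
--         #       For minHeap the top is heap[0]; for maxHeap it is -heap[0].
--         #       If that element is in self.delayed, decrement its count
--         #       (delete the key if count reaches 0) and pop it from the heap.
--         #       Otherwise break.
--         pass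
--
--     def _rebalance(self):
--         if self.maxSize > self.minSize + 1:
--             val = -heapq.heappop(self.maxHeap)
--             self.maxSize -= 1
--             heapq.heappush(self.minHeap, val)
--             self.minSize += 1
--             self.prune(self.maxHeap)
--         elif self.maxSize < self.minSize:
--             val = heapq.heappop(self.minHeap)
--             self.minSize -= 1
--             heapq.heappush(self.maxHeap, -val)
--             self.maxSize += 1
--             self.prune(self.minHeap)
--
--     def _add(self, num: int) -> None:
--         if not self.maxHeap or num <= -self.maxHeap[0]:
--             heapq.heappush(self.maxHeap, -num)
--             self.maxSize += 1
--         else: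
--             heapq.heappush(self.minHeap, num)
--             self.minSize += 1
--         self._rebalance()
--
--     def _remove(self, num: int) -> None:
--         self.delayed[num] = self.delayed.get(num, 0) + 1
--         if self.maxHeap and num <= -self.maxHeap[0]:
--             self.maxSize -= 1
--             if -num == self.maxHeap[0]:
--                 self.prune(self.maxHeap)
--         else:
--             self.minSize -= 1
--             if self.minHeap and num == self.minHeap[0]:
--                 self.prune(self.minHeap)
--         self._rebalance()
--
--     def _getMedian(self) -> float:
--         if self.maxSize == self.minSize:
--             return (-self.maxHeap[0] + self.minHeap[0]) / 2
--         return float(-self.maxHeap[0])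
--
-- def solution(heap_vals: List[int], delayed: dict, is_max_heap: bool) -> Optional[int]:
--     """
--     Construct a heap from heap_vals, apply the given delayed dict, call prune,
--     then return the top element (None if heap is empty after pruning).
--     is_max_heap=True  → values stored negated (max-heap via negation).
--     is_max_heap=False → values stored directly (min-heap).
--     """
--     h = _TwoHeap()
--     h.delayed = dict(delayed)  # copy so the test dict is not mutated
--
--     if is_max_heap:
--         h.maxHeap = [-v for v in heap_vals]
--         heapq.heapify(h.maxHeap)
--         h.prune(h.maxHeap)
--         return -h.maxHeap[0] if h.maxHeap else None
--     else:
--         h.minHeap = list(heap_vals)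
--         heapq.heapify(h.minHeap)
--         h.prune(h.minHeap)
--         return h.minHeap[0] if h.minHeap else None
-- ===== SOURCE B (Python) =====
-- def solution(heap_vals, delayed, is_max_heap):
--     # prune() in the original is a no-op (`pass`), so the delayed dict never
--     # affects the result: the answer is simply the extremum of heap_vals.
--     if not heap_vals:
--         return None
--     return max(heap_vals) if is_max_heap else min(heap_vals)
-- ===== Notes on version B (the rewrite author's own statement) =====
-- stated objective: simpler
-- what changed: A builds a heap (heapify of the possibly-negated list), runs the no-op prune, and peeks the top; B skips all heap machinery and returns max(heap_vals) or min(heap_vals) directly (None on empty), ignoring the delayed dict that A never actually uses.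
import Mathlib
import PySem

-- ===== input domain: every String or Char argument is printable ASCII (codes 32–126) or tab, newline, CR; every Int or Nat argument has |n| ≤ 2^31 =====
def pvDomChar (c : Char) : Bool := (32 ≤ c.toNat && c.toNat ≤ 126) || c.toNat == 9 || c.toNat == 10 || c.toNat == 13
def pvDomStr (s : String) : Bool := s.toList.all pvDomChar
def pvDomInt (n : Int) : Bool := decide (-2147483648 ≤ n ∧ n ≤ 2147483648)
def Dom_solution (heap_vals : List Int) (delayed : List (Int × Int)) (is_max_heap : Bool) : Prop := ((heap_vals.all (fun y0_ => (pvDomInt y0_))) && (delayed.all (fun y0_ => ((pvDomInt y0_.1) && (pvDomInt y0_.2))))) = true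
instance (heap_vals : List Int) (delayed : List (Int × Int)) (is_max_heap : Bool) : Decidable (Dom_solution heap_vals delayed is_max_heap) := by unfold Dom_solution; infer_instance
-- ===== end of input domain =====

-- B replaces A's heapify-then-peek (with its no-op prune and unused delayed dict)
-- by a direct max/min of heap_vals; equivalence of the RETURN value is proved
-- (A mutates nothing the caller passed: it copies the delayed dict).

-- ===== PORT A =====
-- heapq.heapify is ported as the standard bottom-up sift-down heapify over an
-- Array Int (smaller child selected first, as CPython does); the resulting array
-- may order non-root elements differently from CPython's, but is exact for
-- everything A observes: a min-heap permutation of the input, whose root (the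
-- only element A reads) is the same.
def siftDown (a : Array Int) (i : Nat) : Array Int :=
  if h : 2*i+1 < a.size then
    if h2 : 2*i+2 < a.size ∧ a.getD (2*i+2) 0 < a.getD (2*i+1) 0 then
      -- right child exists and is the smaller one
      if a.getD (2*i+2) 0 < a.getD i 0 then
        siftDown (a.swap i (2*i+2) (by omega) h2.1) (2*i+2)
      else a
    else
      -- left child is the (weakly) smaller existing child
      if a.getD (2*i+1) 0 < a.getD i 0 then
        siftDown (a.swap i (2*i+1) (by omega) h) (2*i+1)
      else a
  else a
termination_by a.size - i
decreasing_by
  · simp only [Array.size_swap]; omega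
  · simp only [Array.size_swap]; omega

-- for i in reversed(range(n//2)): siftDown at i
def heapifyAux (a : Array Int) : Nat → Array Int
  | 0 => a
  | k+1 => heapifyAux (siftDown a k) k

def pyHeapify (a : Array Int) : Array Int := heapifyAux a (a.size / 2)

-- _TwoHeap.prune's body is `pass`: a no-op on the heap
def twoHeapPrune (delayed : List (Int × Int)) (heap : Array Int) : Array Int := heap

def solution (heap_vals : List Int) (delayed : List (Int × Int)) (is_max_heap : Bool) : Option Int :=
  -- h.delayed = dict(delayed): the copy is only read by the no-op prune
  if is_max_heap then
    let maxHeap := pyHeapify ((heap_vals.map (fun v => -v)).toArray)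
    let maxHeap := twoHeapPrune delayed maxHeap
    match maxHeap.toList.head? with
    | some t => some (-t)
    | none => none
  else
    let minHeap := pyHeapify heap_vals.toArray
    let minHeap := twoHeapPrune delayed minHeap
    match minHeap.toList.head? with
    | some t => some t
    | none => none

-- ===== PORT B =====
def solution_alt (heap_vals : List Int) (delayed : List (Int × Int)) (is_max_heap : Bool) : Option Int :=
  if heap_vals = [] then none
  else if is_max_heap then PySem.List.max? heap_vals (fun x => x)
  else PySem.List.min? heap_vals (fun x => x)

-- ===== PRECONDITION & SPEC =====
def Spec_solution (heap_vals : List Int) (delayed : List (Int × Int)) (is_max_heap : Bool) (out : Option Int) : Prop := out = solution_alt heap_vals delayed is_max_heap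
instance (heap_vals : List Int) (delayed : List (Int × Int)) (is_max_heap : Bool) (out : Option Int) : Decidable (Spec_solution heap_vals delayed is_max_heap out) := by unfold Spec_solution; infer_instance

-- ===== CLAIM (what is proved, stated in full; the proofs are below) =====
def Claim_equal_solution : Prop := ∀ (heap_vals : List Int) (delayed : List (Int × Int)) (is_max_heap : Bool), Dom_solution heap_vals delayed is_max_heap → Spec_solution heap_vals delayed is_max_heap (solution heap_vals delayed is_max_heap)

-- ===== LEMMAS AND PROOFS =====

-- heap-order links whose parent index is ≥ i all hold
def HeapFrom (a : Array Int) (i : Nat) : Prop :=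
  ∀ j, 1 ≤ j → j < a.size → i ≤ (j-1)/2 → a.getD ((j-1)/2) 0 ≤ a.getD j 0

-- j lies in the subtree rooted at i
def isDesc (i j : Nat) : Bool :=
  if j < i then false
  else if i = j then true
  else isDesc i ((j-1)/2)
termination_by j
decreasing_by omega

theorem size_siftDown (a : Array Int) (i : Nat) : (siftDown a i).size = a.size := by
  fun_induction siftDown a i <;> simp_all [Array.size_swap]

theorem perm_siftDown (a : Array Int) (i : Nat) : (siftDown a i).toList.Perm a.toList := by
  fun_induction siftDown a i with
  | case1 a i h h2 h3 ih => exact ih.trans (Array.perm_iff_toList_perm.mp (Array.swap_perm ..))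
  | case3 a i h h2 h3 ih => exact ih.trans (Array.perm_iff_toList_perm.mp (Array.swap_perm ..))
  | _ => rfl

theorem getD_swap (a : Array Int) (i c : Nat) (hi : i < a.size) (hc : c < a.size) (j : Nat) :
    (a.swap i c hi hc).getD j 0 =
      if j = i then a.getD c 0 else if j = c then a.getD i 0 else a.getD j 0 := by
  by_cases hj : j < a.size
  · simp only [Array.getD, Array.size_swap, hj, dite_true, Array.getElem_swap]
    split_ifs <;> simp_all [Array.getD, hi, hc]
  · simp only [Array.getD, Array.size_swap, hj, dite_false]
    split_ifs with e1 e2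
    · omega
    · omega
    · rfl

theorem isDesc_self (i : Nat) : isDesc i i = true := by
  unfold isDesc; simp

theorem isDesc_le {i j : Nat} (h : isDesc i j = true) : i ≤ j := by
  unfold isDesc at h
  split_ifs at h <;> omega

theorem isDesc_parent {i j : Nat} (h : isDesc i j = true) (hne : j ≠ i) :
    isDesc i ((j-1)/2) = true := by
  unfold isDesc at h
  split_ifs at h with h1 h2
  · omega
  · exact h

theorem isDesc_of_parent {i j : Nat} (h : isDesc i ((j-1)/2) = true) (hj : i < j) :
    isDesc i j = true := by
  unfold isDesc
  split_ifs with h1 h2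
  · omega
  · rfl
  · exact h

theorem isDesc_trans {i c j : Nat} (hic : isDesc i c = true) (hcj : isDesc c j = true) :
    isDesc i j = true := by
  induction j using Nat.strong_induction_on with
  | _ j ih =>
    by_cases hje : j = c
    · exact hje ▸ hic
    · have hp := isDesc_parent hcj hje
      have hcle := isDesc_le hcj
      have hile := isDesc_le hic
      have hjc : c < j := by omega
      exact isDesc_of_parent (ih ((j-1)/2) (by omega) hp) (by omega)

-- every element of the subtree rooted at d is ≥ the value at d
theorem heap_desc_le {a : Array Int} {k d j : Nat} (H : HeapFrom a k) (hkd : k ≤ d)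
    (hd : isDesc d j = true) (hj : j < a.size) : a.getD d 0 ≤ a.getD j 0 := by
  induction j using Nat.strong_induction_on with
  | _ j ih =>
    by_cases hje : j = d
    · simp [hje]
    · have hp := isDesc_parent hd hje
      have hdle := isDesc_le hd
      have hdj : d < j := by omega
      have h1 : a.getD d 0 ≤ a.getD ((j-1)/2) 0 := ih ((j-1)/2) (by omega) hp (by omega)
      have h2 : a.getD ((j-1)/2) 0 ≤ a.getD j 0 :=
        H j (by omega) hj (by have := isDesc_le hp; omega)
      omega

theorem heapFrom_mono {a : Array Int} {k m : Nat} (h : HeapFrom a k) (hkm : k ≤ m) :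
    HeapFrom a m := fun j h1 h2 h3 => h j h1 h2 (by omega)

theorem isDesc_false_of_lt {i j : Nat} (h : j < i) : isDesc i j = false := by
  cases hd : isDesc i j with
  | false => rfl
  | true => exact absurd (isDesc_le hd) (by omega)

theorem isDesc_child {i c : Nat} (hc : c = 2*i+1 ∨ c = 2*i+2) : isDesc i c = true := by
  have hp : (c-1)/2 = i := by omega
  exact isDesc_of_parent (hp ▸ isDesc_self i) (by omega)

-- the triple of conclusions siftDown guarantees: heap links from i on,
-- positions outside the subtree of i untouched, subtree lower bounds preserved
def SDSpec (a b : Array Int) (i : Nat) : Prop :=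
  HeapFrom b i ∧
  (∀ j, j < a.size → isDesc i j = false → b.getD j 0 = a.getD j 0) ∧
  (∀ x : Int, (∀ j, j < a.size → isDesc i j = true → x ≤ a.getD j 0) →
    ∀ j, j < a.size → isDesc i j = true → x ≤ b.getD j 0)

-- no-swap shape: a itself satisfies the triple when i is ≤ its existing children
theorem siftDown_nsw (a : Array Int) (i : Nat) (H : HeapFrom a (i+1))
    (hch : ∀ j, j < a.size → (j = 2*i+1 ∨ j = 2*i+2) → a.getD i 0 ≤ a.getD j 0) :
    SDSpec a a i := by
  refine ⟨?_, fun j _ _ => rfl, fun x hx => hx⟩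
  intro j h1 h2 h3
  by_cases hp : i+1 ≤ (j-1)/2
  · exact H j h1 h2 hp
  · have hpe : (j-1)/2 = i := by omega
    rw [hpe]
    exact hch j h2 (by omega)

-- swap shape: the recursive call at the child c satisfies the triple at i
theorem siftDown_step (a : Array Int) (i c : Nat) (hi : i < a.size) (hc : c < a.size)
    (hchild : c = 2*i+1 ∨ c = 2*i+2)
    (hmin : ∀ c', c' < a.size → (c' = 2*i+1 ∨ c' = 2*i+2) → a.getD c 0 ≤ a.getD c' 0)
    (hlt : a.getD c 0 < a.getD i 0)
    (H : HeapFrom a (i+1))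
    (IH : HeapFrom (a.swap i c hi hc) (c+1) →
      SDSpec (a.swap i c hi hc) (siftDown (a.swap i c hi hc) c) c) :
    SDSpec a (siftDown (a.swap i c hi hc) c) i := by
  have hic : i < c := by omega
  have hsz : (a.swap i c hi hc).size = a.size := Array.size_swap ..
  have hbsz : (siftDown (a.swap i c hi hc) c).size = a.size := by
    rw [size_siftDown, hsz]
  have hget : ∀ j, (a.swap i c hi hc).getD j 0 =
      if j = i then a.getD c 0 else if j = c then a.getD i 0 else a.getD j 0 :=
    getD_swap a i c hi hc
  -- heap links with parent ≥ c+1 are untouched by the swap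
  have H' : HeapFrom (a.swap i c hi hc) (c+1) := by
    intro j h1 h2 h3
    rw [hsz] at h2
    have hj1 : 2*c+3 ≤ j := by omega
    rw [hget, hget, if_neg (by omega), if_neg (by omega), if_neg (by omega), if_neg (by omega)]
    exact H j h1 h2 (by omega)
  obtain ⟨Hb, Unb, LBb⟩ := IH H'
  -- the value a[c] bounds the whole subtree of c in the swapped array
  have K : ∀ j, j < a.size → isDesc c j = true → a.getD c 0 ≤ (a.swap i c hi hc).getD j 0 := by
    intro j hj hd
    by_cases hjc : j = c
    · rw [hget, hjc, if_neg (by omega), if_pos rfl]; omega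
    · have hcj : c < j := by have := isDesc_le hd; omega
      rw [hget, if_neg (by omega), if_neg hjc]
      exact heap_desc_le H (by omega) hd hj
  have hdi_c : isDesc i c = true := isDesc_child hchild
  have hnd_i : isDesc c i = false := isDesc_false_of_lt hic
  refine ⟨?_, ?_, ?_⟩
  · -- HeapFrom b i
    intro j h1 h2 h3
    rw [hbsz] at h2
    by_cases hcp : c ≤ (j-1)/2
    · exact Hb j h1 (by omega) hcp
    · by_cases hjc : j = c
      · -- the link (i, c)
        have hpe : (j-1)/2 = i := by omega
        rw [hpe, Unb i (by omega) hnd_i, hget, if_pos rfl, hjc]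
        exact LBb (a.getD c 0) (fun j' hj' hd' => K j' (by omega) hd')
          c (by omega) (isDesc_self c)
      · -- a link with parent in [i, c), child ≠ c: untouched
        have hndj : isDesc c j = false := by
          cases hd : isDesc c j with
          | false => rfl
          | true =>
            have := isDesc_le (isDesc_parent hd hjc)
            omega
        have hndp : isDesc c ((j-1)/2) = false := isDesc_false_of_lt (by omega)
        rw [Unb j (by omega) hndj, Unb ((j-1)/2) (by omega) hndp]
        by_cases hp : i+1 ≤ (j-1)/2
        · rw [hget, hget, if_neg (by omega), if_neg (by omega), if_neg (by omega),
            if_neg (by omega)]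
          exact H j h1 h2 hp
        · have hpe : (j-1)/2 = i := by omega
          rw [hpe, hget, hget, if_pos rfl, if_neg (by omega), if_neg hjc]
          exact hmin j h2 (by omega)
  · -- positions outside the subtree of i untouched
    intro j hj hnd
    have hji : j ≠ i := by
      intro he; rw [he, isDesc_self] at hnd; exact absurd hnd (by simp)
    have hjc : j ≠ c := by
      intro he; rw [he] at hnd; rw [hdi_c] at hnd; exact absurd hnd (by simp)
    have hndc : isDesc c j = false := by
      cases hd : isDesc c j with
      | false => rfl
      | true => rw [isDesc_trans hdi_c hd] at hnd; exact absurd hnd (by simp)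
    rw [Unb j (by omega) hndc, hget, if_neg hji, if_neg hjc]
  · -- subtree lower bounds preserved
    intro x hx j hj hd
    by_cases hdc : isDesc c j = true
    · refine LBb x ?_ j (by omega) hdc
      intro j' hj' hd'
      rw [hsz] at hj'
      by_cases hjc' : j' = c
      · rw [hget, hjc', if_neg (by omega), if_pos rfl]
        exact hx i hi (isDesc_self i)
      · have : c < j' := by have := isDesc_le hd'; omega
        rw [hget, if_neg (by omega), if_neg hjc']
        exact hx j' hj' (isDesc_trans hdi_c hd')
    · rw [Unb j (by omega) (by simpa using hdc), hget]
      by_cases hji : j = i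
      · rw [if_pos hji]
        exact hx c hc hdi_c
      · rw [if_neg hji, if_neg (fun (he : j = c) => hdc (he ▸ isDesc_self c))]
        exact hx j hj hd

-- the main siftDown lemma
theorem siftDown_spec (a : Array Int) (i : Nat) (H : HeapFrom a (i+1)) :
    HeapFrom (siftDown a i) i ∧
    (∀ j, j < a.size → isDesc i j = false → (siftDown a i).getD j 0 = a.getD j 0) ∧
    (∀ x : Int, (∀ j, j < a.size → isDesc i j = true → x ≤ a.getD j 0) →
      ∀ j, j < a.size → isDesc i j = true → x ≤ (siftDown a i).getD j 0) := by
  have : SDSpec a (siftDown a i) i := by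
    revert H
    fun_induction siftDown a i with
    | case1 a i h h2 h3 ih =>
      intro H
      exact siftDown_step a i (2*i+2) (by omega) h2.1 (by omega)
        (fun c' hc' hch => by rcases hch with h' | h' <;> subst h' <;> omega)
        h3 H (fun H' => ih H')
    | case2 a i h h2 h3 =>
      intro H
      exact siftDown_nsw a i H
        (fun j hj hch => by rcases hch with h' | h' <;> subst h' <;> omega)
    | case3 a i h h2 h3 ih =>
      intro H
      exact siftDown_step a i (2*i+1) (by omega) h (by omega)
        (fun c' hc' hch => by
          rcases hch with h' | h'
          · subst h'; omega
          · subst h'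
            have : ¬ (2*i+2 < a.size ∧ a.getD (2*i+2) 0 < a.getD (2*i+1) 0) := h2
            omega)
        h3 H (fun H' => ih H')
    | case4 a i h h2 h3 =>
      intro H
      exact siftDown_nsw a i H
        (fun j hj hch => by
          rcases hch with h' | h'
          · subst h'; omega
          · subst h'
            have : ¬ (2*i+2 < a.size ∧ a.getD (2*i+2) 0 < a.getD (2*i+1) 0) := h2
            omega)
    | case5 a i h =>
      intro H
      exact siftDown_nsw a i H (fun j hj hch => by omega)
  exact this

theorem heapifyAux_spec (a : Array Int) (k : Nat) (H : HeapFrom a k) :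
    HeapFrom (heapifyAux a k) 0 := by
  induction k generalizing a with
  | zero => exact H
  | succ k ih =>
    have hs := siftDown_spec a k (heapFrom_mono H (by omega))
    exact ih (siftDown a k) hs.1

theorem size_heapifyAux (a : Array Int) (k : Nat) : (heapifyAux a k).size = a.size := by
  induction k generalizing a with
  | zero => rfl
  | succ k ih => simpa [heapifyAux, size_siftDown] using ih (siftDown a k)

theorem perm_heapifyAux (a : Array Int) (k : Nat) : (heapifyAux a k).toList.Perm a.toList := by
  induction k generalizing a with
  | zero => exact List.Perm.refl _
  | succ k ih => exact (ih (siftDown a k)).trans (perm_siftDown a k)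

theorem heapFrom_init (a : Array Int) : HeapFrom a (a.size / 2) := by
  intro j h1 h2 h3
  omega

theorem pyHeapify_root_min (a : Array Int) :
    ∀ j, j < (pyHeapify a).size → (pyHeapify a).getD 0 0 ≤ (pyHeapify a).getD j 0 := by
  intro j hj
  have H : HeapFrom (pyHeapify a) 0 := heapifyAux_spec a (a.size/2) (heapFrom_init a)
  exact heap_desc_le H (Nat.le_refl 0)
    (by
      -- every index is a descendant of the root
      clear hj
      induction j using Nat.strong_induction_on with
      | _ j ih =>
        by_cases hj0 : j = 0
        · simp [hj0, isDesc_self]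
        · exact isDesc_of_parent (ih ((j-1)/2) (by omega)) (by omega)) hj

theorem size_pyHeapify (a : Array Int) : (pyHeapify a).size = a.size :=
  size_heapifyAux a (a.size / 2)

theorem perm_pyHeapify (a : Array Int) : (pyHeapify a).toList.Perm a.toList :=
  perm_heapifyAux a (a.size / 2)

-- root of the heapified list is head?, and it is the minimum of the input list
theorem pyHeapify_head_min (l : List Int) (hne : l ≠ []) :
    ∃ r, (pyHeapify l.toArray).toList.head? = some r ∧ r ∈ l ∧ ∀ y ∈ l, r ≤ y := by
  have hperm : (pyHeapify l.toArray).toList.Perm l := by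
    simpa using perm_pyHeapify l.toArray
  have hsz : 0 < (pyHeapify l.toArray).size := by
    rw [size_pyHeapify]
    simpa using List.length_pos_of_ne_nil hne
  have hlen : 0 < (pyHeapify l.toArray).toList.length := by simpa using hsz
  refine ⟨(pyHeapify l.toArray).toList.head (by simpa using List.ne_nil_of_length_pos hlen),
    List.head?_eq_some_head _, ?_, ?_⟩
  · exact hperm.mem_iff.mp (List.head_mem _)
  · intro y hy
    have hy' : y ∈ (pyHeapify l.toArray).toList := hperm.mem_iff.mpr hy
    obtain ⟨j, hj, hje⟩ := List.mem_iff_getElem.mp hy'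
    have hj' : j < (pyHeapify l.toArray).size := by simpa using hj
    have hroot := pyHeapify_root_min l.toArray j hj'
    have h0 : (pyHeapify l.toArray).getD 0 0 = (pyHeapify l.toArray).toList.head
        (List.ne_nil_of_length_pos hlen) := by
      simp [Array.getD, hsz, List.head_eq_getElem, ← Array.getElem_toList]
    have hjv : (pyHeapify l.toArray).getD j 0 = y := by
      simp [Array.getD, hj', ← hje, ← Array.getElem_toList]
    rw [h0, hjv] at hroot
    exact hroot

-- ===== VERDICT (by name: the statement is the Claim_ definition above) =====
theorem solution_spec : Claim_equal_solution := by
  intro l d m _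
  unfold Spec_solution solution solution_alt twoHeapPrune
  by_cases hne : l = []
  · subst hne
    cases m <;> simp [pyHeapify, heapifyAux]
  · simp only [if_neg hne]
    cases m with
    | false =>
      obtain ⟨r, hh, hmem, hmin⟩ := pyHeapify_head_min l hne
      obtain ⟨m', hm'⟩ : ∃ m', PySem.List.min? l (fun x => x) = some m' := by
        cases h : PySem.List.min? l (fun x => x) with
        | none => exact absurd (((PySem.List.min?_eq_none_iff _ _).mp h)) hne
        | some v => exact ⟨v, rfl⟩
      have h1 : m' ≤ r := PySem.List.min?_isMin hm' r hmem
      have h2 : r ≤ m' := hmin m' (PySem.List.min?_mem hm')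
      simp [hh, hm', le_antisymm h2 h1]
    | true =>
      have hne' : l.map (fun v => -v) ≠ [] := by simpa using hne
      obtain ⟨r, hh, hmem, hmin⟩ := pyHeapify_head_min (l.map (fun v => -v)) hne'
      obtain ⟨M, hM⟩ : ∃ M, PySem.List.max? l (fun x => x) = some M := by
        cases h : PySem.List.max? l (fun x => x) with
        | none => exact absurd (((PySem.List.max?_eq_none_iff _ _).mp h)) hne
        | some v => exact ⟨v, rfl⟩
      obtain ⟨x, hx, hxe⟩ := List.mem_map.mp hmem
      have h1 : r ≤ -M := hmin (-M) (List.mem_map.mpr ⟨M, PySem.List.max?_mem hM, rfl⟩)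
      have h2 : -M ≤ r := by
        have := PySem.List.max?_isMax hM x hx
        omega
      have : -r = M := by omega
      simp [hh, hM, this]
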